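-- pv_equiv track=rewrite | github.com/implse/Code_Challenges | Dropbox/campusCup.py | campusCup
-- ===== SOURCE A (Python) =====
-- def campusCup(emails):
--     schools = dict()
--     for email in emails:
--         name, school = email.split("@")
--         if school not in schools.keys():
--             schools[school] = 20
--         else:
--             schools[school] += 20
--
--     school_points = {
--         0: [],
--         100: [],
--         200: [],
--         300: [],
--         500: []
--     }
--
--     for school, point in schools.items():
--         if point >= 500:
--             school_points[500].append(school)
--         elif 300 <= point < 500:
--             school_points[300].append(school)
--         elif 200 <= point < 300:
--             school_points[200].append(school)
--         elif 100 <= point < 200: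
--             school_points[100].append(school)
--         else:
--             school_points[0].append(school)
--
--     school_rank = list()
--
--     if len(school_points[500]) > 0:
--         school_points[500].sort()
--         extend(school_rank, school_points[500])
--     if len(school_points[300]) > 0:
--         school_points[300].sort()
--         extend(school_rank, school_points[300])
--     if len(school_points[200]) > 0:
--         school_points[200].sort()
--         extend(school_rank, school_points[200])
--     if len(school_points[100]) > 0:
--         school_points[100].sort()
--         extend(school_rank, school_points[100])
--     if len(school_points[0]) > 0:
--         school_points[0]
--         extend(school_rank, school_points[0])
--
--     return school_rank
--
-- def extend(lst1, lst2):
--     for i in lst2: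
--         lst1.append(i)
-- ===== SOURCE B (Python) =====
-- def campusCup(emails):
--     schools = {}
--     for email in emails:
--         name, school = email.split("@")
--         schools[school] = schools.get(school, 0) + 20
--
--     def tier(point):
--         if point >= 500:
--             return 500
--         if point >= 300:
--             return 300
--         if point >= 200:
--             return 200
--         if point >= 100:
--             return 100
--         return 0
--
--     ranked = []
--     unranked = []
--     for school, point in schools.items():
--         if point >= 100:
--             ranked.append((school, point))
--         else:
--             unranked.append(school)
--
--     ranked.sort(key=lambda kv: (-tier(kv[1]), kv[0]))
--     return [school for school, _ in ranked] + unranked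
-- ===== Notes on version B (the rewrite author's own statement) =====
-- stated objective: alternative
-- what changed: Replaces A's five explicit tier buckets (each sorted and appended through guarded extend calls) with one pass splitting schools into ranked/unranked plus a single key-based sort by (-tier, name), keeping the unranked tier in insertion order.
import Mathlib
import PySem

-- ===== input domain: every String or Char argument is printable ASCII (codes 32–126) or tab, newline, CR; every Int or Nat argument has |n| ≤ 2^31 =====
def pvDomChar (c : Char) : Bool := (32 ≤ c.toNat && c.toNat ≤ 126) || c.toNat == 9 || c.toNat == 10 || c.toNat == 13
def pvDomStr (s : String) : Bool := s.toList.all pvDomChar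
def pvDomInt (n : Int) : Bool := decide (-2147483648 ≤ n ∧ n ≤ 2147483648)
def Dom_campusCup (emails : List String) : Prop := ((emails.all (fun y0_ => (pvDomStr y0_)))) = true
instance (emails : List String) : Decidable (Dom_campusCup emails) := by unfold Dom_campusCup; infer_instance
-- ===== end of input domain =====

-- B replaces A's five explicit tier buckets with one ranked/unranked split plus a single
-- sort keyed by (-tier, name); same return value, a different decomposition (no speed claim).

-- ===== PORT A =====
-- helper 'extend' from the Python module
def pyExtend (lst1 lst2 : List String) : List String :=
  lst2.foldl (fun acc i => acc ++ [i]) lst1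

def campusCup (emails : List String) : List String :=
  let schools : PySem.Dict String Int :=
    emails.foldl (fun d email =>
      let parts := (PySem.Str.split? email "@").getD []
      let _name := parts.getD 0 ""
      let school := parts.getD 1 ""
      if school ∉ d.keys then d.insert school 20 else d.modify school 0 (· + 20)) PySem.Dict.empty
  let sp0 : PySem.Dict Int (List String) :=
    PySem.Dict.ofList [(0, []), (100, []), (200, []), (300, []), (500, [])]
  let sp :=
    schools.items.foldl (fun sp p =>
      let school := p.1
      let point := p.2
      if 500 ≤ point then sp.modify 500 [] (· ++ [school])
      else if 300 ≤ point ∧ point < 500 then sp.modify 300 [] (· ++ [school])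
      else if 200 ≤ point ∧ point < 300 then sp.modify 200 [] (· ++ [school])
      else if 100 ≤ point ∧ point < 200 then sp.modify 100 [] (· ++ [school])
      else sp.modify 0 [] (· ++ [school])) sp0
  let rank : List String := []
  let rank := if 0 < (sp.getD 500 []).length then
      pyExtend rank (PySem.List.sorted (sp.getD 500 []) (fun x => x) false) else rank
  let rank := if 0 < (sp.getD 300 []).length then
      pyExtend rank (PySem.List.sorted (sp.getD 300 []) (fun x => x) false) else rank
  let rank := if 0 < (sp.getD 200 []).length then
      pyExtend rank (PySem.List.sorted (sp.getD 200 []) (fun x => x) false) else rank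
  let rank := if 0 < (sp.getD 100 []).length then
      pyExtend rank (PySem.List.sorted (sp.getD 100 []) (fun x => x) false) else rank
  let rank := if 0 < (sp.getD 0 []).length then pyExtend rank (sp.getD 0 []) else rank
  rank

-- ===== PORT B =====
-- B's local 'tier' function
def tierB (point : Int) : Int :=
  if 500 ≤ point then 500
  else if 300 ≤ point then 300
  else if 200 ≤ point then 200
  else if 100 ≤ point then 100
  else 0

def campusCup_alt (emails : List String) : List String :=
  let schools : PySem.Dict String Int :=
    emails.foldl (fun d email =>
      let parts := (PySem.Str.split? email "@").getD []
      let _name := parts.getD 0 ""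
      let school := parts.getD 1 ""
      d.insert school (d.getD school 0 + 20)) PySem.Dict.empty
  let st :=
    schools.items.foldl (fun (rb : List (String × Int) × List String) p =>
      if 100 ≤ p.2 then (rb.1 ++ [p], rb.2) else (rb.1, rb.2 ++ [p.1])) ([], [])
  let ranked := PySem.List.sorted2 st.1 (fun kv => -(tierB kv.2)) (fun kv => kv.1) false
  ranked.map (fun kv => kv.1) ++ st.2

-- ===== PRECONDITION & SPEC =====
-- Pre_ excludes emails that do not contain exactly one '@': there A's tuple unpacking of
-- email.split("@") raises ValueError (B raises identically).
def Pre_campusCup (emails : List String) : Prop :=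
  ∀ e ∈ emails, ((PySem.Str.split? e "@").getD []).length = 2
instance (emails : List String) : Decidable (Pre_campusCup emails) := by
  unfold Pre_campusCup; infer_instance
def pvWitness_campusCup : List String := ["ann@mit", "bob@mit", "cyd@uw"]

def Spec_campusCup (emails : List String) (out : List String) : Prop := out = campusCup_alt emails
instance (emails : List String) (out : List String) : Decidable (Spec_campusCup emails out) := by unfold Spec_campusCup; infer_instance

-- ===== CLAIM (what is proved, stated in full; the proofs are below) =====
def Claim_equal_campusCup : Prop := ∀ (emails : List String), Dom_campusCup emails → Pre_campusCup emails → Spec_campusCup emails (campusCup emails)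

-- ===== LEMMAS AND PROOFS =====

-- the school extracted from one email, and the points dict both first loops build
def schoolOf (email : String) : String := ((PySem.Str.split? email "@").getD []).getD 1 ""

def pts (emails : List String) : PySem.Dict String Int :=
  emails.foldl (fun d e => d.insert (schoolOf e) (d.getD (schoolOf e) 0 + 20)) PySem.Dict.empty

lemma tierB_of_eq {x c : Int} (hc : c = 500 ∨ c = 300 ∨ c = 200 ∨ c = 100)
    (h : tierB x = c) : 100 ≤ x := by
  simp only [tierB] at h; split_ifs at h <;> omega

lemma dictA_eq (emails : List String) :
    emails.foldl (fun d email =>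
      let parts := (PySem.Str.split? email "@").getD []
      let _name := parts.getD 0 ""
      let school := parts.getD 1 ""
      if school ∉ d.keys then d.insert school 20 else d.modify school 0 (· + 20))
      PySem.Dict.empty = pts emails := by
  unfold pts
  apply PySem.List.foldl_congr_mem
  intro d e _
  simp only [schoolOf]
  set s := ((PySem.Str.split? e "@").getD []).getD 1 ""
  by_cases h : s ∈ d.keys
  · simp [h, PySem.Dict.modify]
  · have hc : d.contains s = false := by
      rw [← Bool.not_eq_true]; rw [PySem.Dict.contains_iff_mem_keys]; exact h
    simp [h, PySem.Dict.getD_of_not_contains _ _ hc]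

lemma dictB_eq (emails : List String) :
    emails.foldl (fun d email =>
      let parts := (PySem.Str.split? email "@").getD []
      let _name := parts.getD 0 ""
      let school := parts.getD 1 ""
      d.insert school (d.getD school 0 + 20)) PySem.Dict.empty = pts emails := rfl

lemma pts_nodup (emails : List String) : ((pts emails).items.map (fun p => p.1)).Nodup := by
  have h := PySem.Dict.nodup_keys_foldl_insert_key emails schoolOf
      (fun (d : PySem.Dict String Int) x => d.getD (schoolOf x) 0 + 20) PySem.Dict.empty PySem.Dict.nodup_keys_empty
  simpa [pts, PySem.Dict.keys] using h

lemma bucketfold (L : List (String × Int)) (c : Int)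
    (sp0 : PySem.Dict Int (List String)) :
    (L.foldl (fun sp p =>
      let school := p.1
      let point := p.2
      if 500 ≤ point then sp.modify 500 [] (· ++ [school])
      else if 300 ≤ point ∧ point < 500 then sp.modify 300 [] (· ++ [school])
      else if 200 ≤ point ∧ point < 300 then sp.modify 200 [] (· ++ [school])
      else if 100 ≤ point ∧ point < 200 then sp.modify 100 [] (· ++ [school])
      else sp.modify 0 [] (· ++ [school])) sp0).getD c []
      = sp0.getD c [] ++ (L.filter (fun p => tierB p.2 == c)).map (fun p => p.1) := by
  have hstep : L.foldl (fun sp p =>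
      let school := p.1
      let point := p.2
      if 500 ≤ point then sp.modify 500 [] (· ++ [school])
      else if 300 ≤ point ∧ point < 500 then sp.modify 300 [] (· ++ [school])
      else if 200 ≤ point ∧ point < 300 then sp.modify 200 [] (· ++ [school])
      else if 100 ≤ point ∧ point < 200 then sp.modify 100 [] (· ++ [school])
      else sp.modify 0 [] (· ++ [school])) sp0
      = L.foldl (fun sp p => sp.modify (tierB p.2) [] (· ++ [p.1])) sp0 := by
    apply PySem.List.foldl_congr_mem
    intro sp p _
    simp only [tierB]
    split_ifs with h1 h2 h3 h4 <;> first | rfl | omega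
  rw [hstep]
  have hmap : L.foldl (fun sp p => sp.modify (tierB p.2) [] (· ++ [p.1])) sp0
      = (L.map (fun p => (tierB p.2, p.1))).foldl (fun sp q => sp.modify q.1 [] (· ++ [q.2])) sp0 := by
    rw [List.foldl_map]
  rw [hmap, PySem.Dict.getD_foldl_modify_append]
  congr 1
  rw [List.filter_map]
  simp only [List.map_map]
  rfl

lemma sorted2_eq_sorted_lex {α : Type} (xs : List α) (k1 : α → Int) (k2 : α → String) :
    PySem.List.sorted2 xs k1 k2 false
      = PySem.List.sorted xs (fun a => toLex (k1 a, k2 a)) false := by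
  unfold PySem.List.sorted2 PySem.List.sorted
  simp only []
  congr 1
  funext acc x
  congr 1
  funext a b
  have : (toLex (k1 a, k2 a) < toLex (k1 b, k2 b)) ↔
      (k1 a < k1 b ∨ (k1 a = k1 b ∧ k2 a < k2 b)) := Prod.Lex.toLex_lt_toLex
  by_cases h1 : k1 a < k1 b
  · simp [h1, this]
  · by_cases h2 : k1 b < k1 a
    · have : ¬ (k1 a = k1 b) := by omega
      simp [h1, h2, Prod.Lex.toLex_lt_toLex, this]
    · have he : k1 a = k1 b := by omega
      by_cases h3 : k2 a < k2 b <;> simp [h3, Prod.Lex.toLex_lt_toLex, he]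

lemma sorted_pairwise_fst_lt (F : List (String × Int)) (h : (F.map (fun p => p.1)).Nodup) :
    (PySem.List.sorted F (fun kv => kv.1) false).Pairwise (fun a b => a.1 < b.1) := by
  have hp : (PySem.List.sorted F (fun kv => kv.1) false).Pairwise
      (fun a b => a.1 ≤ b.1) := PySem.List.sorted_pairwise F (fun kv => kv.1)
  have hperm : (PySem.List.sorted F (fun kv => kv.1) false).Perm F :=
    PySem.List.sorted_perm F (fun kv => kv.1) false
  have hne : F.Pairwise (fun a b => a.1 ≠ b.1) :=
    (List.pairwise_map (f := fun (p : String × Int) => p.1)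
      (R := fun (a b : String) => a ≠ b) (l := F)).1 h
  have hne' : (PySem.List.sorted F (fun kv => kv.1) false).Pairwise (fun a b => a.1 ≠ b.1) :=
    ((hperm.pairwise_iff (fun hxy h' => hxy h'.symm)).2 hne)
  exact (hp.and hne').imp (fun ⟨hle, hneq⟩ => lt_of_le_of_ne hle hneq)

lemma nodup_filter_fst {L : List (String × Int)} (hnd : (L.map (fun p => p.1)).Nodup)
    (q : String × Int → Bool) : ((L.filter q).map (fun p => p.1)).Nodup :=
  hnd.sublist ((List.filter_sublist (p := q)).map _)

lemma proj_sorted (F : List (String × Int)) (h : (F.map (fun p => p.1)).Nodup) :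
    (PySem.List.sorted F (fun kv => kv.1) false).map (fun p => p.1)
      = PySem.List.sorted (F.map (fun p => p.1)) (fun x => x) false := by
  symm
  apply PySem.List.sorted_eq_of_perm_of_pairwise_lt
  · exact ((PySem.List.sorted_perm F (fun kv => kv.1) false).map _)
  · rw [List.pairwise_map]
    exact sorted_pairwise_fst_lt F h

lemma ranked_eq (L : List (String × Int)) (hnd : (L.map (fun p => p.1)).Nodup) :
    PySem.List.sorted (L.filter (fun p => decide (100 ≤ p.2)))
        (fun kv => toLex (-(tierB kv.2), kv.1)) false
      = PySem.List.sorted (L.filter (fun p => tierB p.2 == 500)) (fun kv => kv.1) false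
        ++ PySem.List.sorted (L.filter (fun p => tierB p.2 == 300)) (fun kv => kv.1) false
        ++ PySem.List.sorted (L.filter (fun p => tierB p.2 == 200)) (fun kv => kv.1) false
        ++ PySem.List.sorted (L.filter (fun p => tierB p.2 == 100)) (fun kv => kv.1) false := by
  set R := L.filter (fun p => decide (100 ≤ p.2)) with hR
  have memtier : ∀ (c : Int) (x : String × Int),
      x ∈ PySem.List.sorted (L.filter (fun p => tierB p.2 == c)) (fun kv => kv.1) false →
      tierB x.2 = c := by
    intro c x hx
    have : x ∈ L.filter (fun p => tierB p.2 == c) := (PySem.List.mem_sorted _ _ _ _).1 hx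
    have := (List.mem_filter.1 this).2
    exact by simpa using this
  apply PySem.List.sorted_eq_of_perm_of_pairwise_lt
  · -- permutation
    have key_perm : ∀ (M : List (String × Int)),
        (PySem.List.sorted M (fun kv => kv.1) false).Perm M :=
      fun M => PySem.List.sorted_perm M (fun kv => kv.1) false
    have e5 : R.filter (fun p => tierB p.2 == 500) = L.filter (fun p => tierB p.2 == 500) := by
      rw [hR, List.filter_filter]
      refine List.filter_congr ?_
      intro x _
      by_cases h : tierB x.2 = 500
      · simp [h, tierB_of_eq (by omega) h]
      · simp [h]
    set R1 := R.filter (fun p => !(tierB p.2 == 500)) with hR1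
    have hR1' : R1 = L.filter (fun p => decide (100 ≤ p.2) && !(tierB p.2 == 500)) := by
      rw [hR1, hR, List.filter_filter]
      refine List.filter_congr ?_
      intro x _
      rw [Bool.and_comm]
    have e3 : R1.filter (fun p => tierB p.2 == 300) = L.filter (fun p => tierB p.2 == 300) := by
      rw [hR1', List.filter_filter]
      refine List.filter_congr ?_
      intro x _
      by_cases h : tierB x.2 = 300
      · simp [h, tierB_of_eq (by omega) h]
      · simp [h]
    set R2 := R1.filter (fun p => !(tierB p.2 == 300)) with hR2
    have hR2' : R2 = L.filter (fun p =>
        decide (100 ≤ p.2) && !(tierB p.2 == 500) && !(tierB p.2 == 300)) := by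
      rw [hR2, hR1', List.filter_filter]
      refine List.filter_congr ?_
      intro x _
      cases h1 : decide (100 ≤ x.2) <;> cases h2 : tierB x.2 == 500 <;> cases h3 : tierB x.2 == 300 <;> rfl
    have e2 : R2.filter (fun p => tierB p.2 == 200) = L.filter (fun p => tierB p.2 == 200) := by
      rw [hR2', List.filter_filter]
      refine List.filter_congr ?_
      intro x _
      by_cases h : tierB x.2 = 200
      · simp [h, tierB_of_eq (by omega) h]
      · simp [h]
    have e1 : R2.filter (fun p => !(tierB p.2 == 200)) = L.filter (fun p => tierB p.2 == 100) := by
      rw [hR2', List.filter_filter]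
      refine List.filter_congr ?_
      intro x _
      simp only [tierB]
      split_ifs <;> simp <;> omega
    have hA := List.filter_append_perm (fun p => tierB p.2 == 500) R
    have hB := List.filter_append_perm (fun p => tierB p.2 == 300) R1
    have hC := List.filter_append_perm (fun p => tierB p.2 == 200) R2
    rw [e5] at hA; rw [e3] at hB; rw [e2, e1] at hC
    have hperm : (L.filter (fun p => tierB p.2 == 500) ++ (L.filter (fun p => tierB p.2 == 300)
        ++ (L.filter (fun p => tierB p.2 == 200) ++ L.filter (fun p => tierB p.2 == 100)))).Perm R := by
      exact List.Perm.trans (List.Perm.append_left _ (List.Perm.trans (List.Perm.append_left _ hC) hB)) hA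
    refine List.Perm.trans (List.Perm.append (List.Perm.append (List.Perm.append (key_perm _) (key_perm _)) (key_perm _)) (key_perm _)) ?_
    simpa [List.append_assoc] using hperm
  · -- pairwise in the lex key
    have within : ∀ c : Int,
        (PySem.List.sorted (L.filter (fun p => tierB p.2 == c)) (fun kv => kv.1) false).Pairwise
          (fun a b => (toLex (-(tierB a.2), a.1) : Lex (Int × String)) < toLex (-(tierB b.2), b.1)) := by
      intro c
      refine List.Pairwise.imp_of_mem ?_ (sorted_pairwise_fst_lt _ (nodup_filter_fst hnd _))
      intro a b ha hb hlt
      rw [Prod.Lex.toLex_lt_toLex]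
      right
      exact ⟨by rw [memtier c a ha, memtier c b hb], hlt⟩
    have cross : ∀ (c c' : Int), c' < c →
        ∀ a ∈ PySem.List.sorted (L.filter (fun p => tierB p.2 == c)) (fun kv => kv.1) false,
        ∀ b ∈ PySem.List.sorted (L.filter (fun p => tierB p.2 == c')) (fun kv => kv.1) false,
        (toLex (-(tierB a.2), a.1) : Lex (Int × String)) < toLex (-(tierB b.2), b.1) := by
      intro c c' hcc a ha b hb
      rw [Prod.Lex.toLex_lt_toLex]
      left
      rw [memtier c a ha, memtier c' b hb]
      omega
    simp only [List.pairwise_append, List.mem_append]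
    refine ⟨⟨⟨within 500, within 300, ?_⟩, within 200, ?_⟩, within 100, ?_⟩
    · exact fun a ha b hb => cross 500 300 (by norm_num) a ha b hb
    · intro a ha b hb
      rcases ha with ha | ha
      · exact cross 500 200 (by norm_num) a ha b hb
      · exact cross 300 200 (by norm_num) a ha b hb
    · intro a ha b hb
      rcases ha with (ha | ha) | ha
      · exact cross 500 100 (by norm_num) a ha b hb
      · exact cross 300 100 (by norm_num) a ha b hb
      · exact cross 200 100 (by norm_num) a ha b hb


-- B's split fold
lemma splitfold (L : List (String × Int)) (acc : List (String × Int) × List String) :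
    L.foldl (fun rb p => if 100 ≤ p.2 then (rb.1 ++ [p], rb.2) else (rb.1, rb.2 ++ [p.1])) acc
      = (acc.1 ++ L.filter (fun p => decide (100 ≤ p.2)),
         acc.2 ++ (L.filter (fun p => !decide (100 ≤ p.2))).map (fun p => p.1)) := by
  induction L generalizing acc with
  | nil => simp
  | cons p t ih =>
    by_cases h : 100 ≤ p.2 <;> simp [h, ih]

-- drop A's 'if len > 0' guards
lemma guard_sort_extend (r b : List String) :
    (if 0 < b.length then pyExtend r (PySem.List.sorted b (fun x => x) false) else r)
      = r ++ PySem.List.sorted b (fun x => x) false := by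
  unfold pyExtend
  rw [PySem.List.foldl_append_singleton]
  cases b
  · simp [PySem.List.sorted]
  · simp

lemma guard_extend (r b : List String) :
    (if 0 < b.length then pyExtend r b else r) = r ++ b := by
  unfold pyExtend
  rw [PySem.List.foldl_append_singleton]
  cases b <;> simp

-- the unranked predicates agree
lemma unranked_filter (L : List (String × Int)) :
    L.filter (fun p => tierB p.2 == 0) = L.filter (fun p => !decide (100 ≤ p.2)) := by
  refine List.filter_congr ?_
  intro x _
  simp only [tierB]
  split_ifs <;> simp <;> omega

-- ===== VERDICT (by name: the statement is the Claim_ definition above) =====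
theorem campusCup_spec : Claim_equal_campusCup := by
  intro emails _ _
  unfold Spec_campusCup campusCup campusCup_alt
  simp only []
  rw [dictA_eq, dictB_eq]
  set L := (pts emails).items with hL
  rw [splitfold]
  simp only [List.nil_append]
  rw [sorted2_eq_sorted_lex]
  simp only [bucketfold]
  have g500 : (PySem.Dict.ofList ([(0, []), (100, []), (200, []), (300, []), (500, [])] :
      List (Int × List String))).getD 500 [] = [] := rfl
  have g300 : (PySem.Dict.ofList ([(0, []), (100, []), (200, []), (300, []), (500, [])] :
      List (Int × List String))).getD 300 [] = [] := rfl
  have g200 : (PySem.Dict.ofList ([(0, []), (100, []), (200, []), (300, []), (500, [])] :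
      List (Int × List String))).getD 200 [] = [] := rfl
  have g100 : (PySem.Dict.ofList ([(0, []), (100, []), (200, []), (300, []), (500, [])] :
      List (Int × List String))).getD 100 [] = [] := rfl
  have g0 : (PySem.Dict.ofList ([(0, []), (100, []), (200, []), (300, []), (500, [])] :
      List (Int × List String))).getD 0 [] = [] := rfl
  rw [g500, g300, g200, g100, g0]
  simp only [List.nil_append]
  rw [guard_sort_extend, guard_sort_extend, guard_sort_extend, guard_sort_extend, guard_extend]
  rw [ranked_eq L (pts_nodup emails)]
  simp only [List.map_append]
  rw [proj_sorted _ (nodup_filter_fst (pts_nodup emails) _),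
      proj_sorted _ (nodup_filter_fst (pts_nodup emails) _),
      proj_sorted _ (nodup_filter_fst (pts_nodup emails) _),
      proj_sorted _ (nodup_filter_fst (pts_nodup emails) _),
      ← unranked_filter]
  rw [hL]
  simp [List.append_assoc]
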